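-- pv_equiv track=rewrite | github.com/pjfmartins83/python_exercises | drone_control/challenge.py | get_drone_position
-- ===== SOURCE A (Python) =====
-- def get_drone_position(moves):
--     x = 0
--     y = 0
--     for move in moves:
--         if move == "U":
--             y += 1
--         elif move == "D":
--             y -= 1
--         elif move == "R":
--             x += 1
--         elif move == "L":
--             x -= 1
--     return (x, y)
-- ===== SOURCE B (Python) =====
-- def get_drone_position(moves):
--     return (moves.count("R") - moves.count("L"),
--             moves.count("U") - moves.count("D"))
-- ===== Notes on version B (the rewrite author's own statement) =====
-- stated objective: simpler
-- what changed: Replaces A's single branching accumulator loop with four independent list.count passes (one per direction letter) combined by plain subtraction; no loop state is maintained at all.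
import Mathlib
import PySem

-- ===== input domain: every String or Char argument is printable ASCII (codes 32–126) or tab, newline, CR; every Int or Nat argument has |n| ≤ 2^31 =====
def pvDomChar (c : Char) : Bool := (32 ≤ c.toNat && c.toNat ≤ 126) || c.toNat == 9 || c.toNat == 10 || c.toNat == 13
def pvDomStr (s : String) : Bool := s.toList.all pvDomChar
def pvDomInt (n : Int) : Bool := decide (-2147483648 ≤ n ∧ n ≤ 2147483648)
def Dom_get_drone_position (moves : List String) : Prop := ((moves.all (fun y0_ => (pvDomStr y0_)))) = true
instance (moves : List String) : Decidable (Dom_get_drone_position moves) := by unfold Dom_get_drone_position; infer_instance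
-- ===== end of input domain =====

-- B replaces A's stateful branching loop with four independent list.count passes
-- combined by subtraction (simpler: no loop, no accumulator; same O(n) cost).

-- ===== PORT A =====
def get_drone_position (moves : List String) : Int × Int :=
  moves.foldl
    (fun (s : Int × Int) move =>
      if move == "U" then (s.1, s.2 + 1)
      else if move == "D" then (s.1, s.2 - 1)
      else if move == "R" then (s.1 + 1, s.2)
      else if move == "L" then (s.1 - 1, s.2)
      else s)
    (0, 0)

-- ===== PORT B =====
def get_drone_position_alt (moves : List String) : Int × Int :=
  ((PySem.List.count moves "R" : Int) - (PySem.List.count moves "L" : Int),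
   (PySem.List.count moves "U" : Int) - (PySem.List.count moves "D" : Int))

-- ===== PRECONDITION & SPEC =====
def Spec_get_drone_position (moves : List String) (out : Int × Int) : Prop := out = get_drone_position_alt moves
instance (moves : List String) (out : Int × Int) : Decidable (Spec_get_drone_position moves out) := by unfold Spec_get_drone_position; infer_instance

-- ===== CLAIM =====
def Claim_equal_get_drone_position : Prop := ∀ (moves : List String), Dom_get_drone_position moves → Spec_get_drone_position moves (get_drone_position moves)

-- ===== LEMMAS AND PROOFS =====

-- A's loop, started at any state (x, y), lands at the counts of the four letters.
theorem fold_counts (l : List String) (x y : Int) :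
    l.foldl
      (fun (s : Int × Int) move =>
        if move == "U" then (s.1, s.2 + 1)
        else if move == "D" then (s.1, s.2 - 1)
        else if move == "R" then (s.1 + 1, s.2)
        else if move == "L" then (s.1 - 1, s.2)
        else s)
      (x, y)
    = (x + l.count "R" - l.count "L", y + l.count "U" - l.count "D") := by
  induction l generalizing x y with
  | nil => simp
  | cons h t ih =>
    by_cases hU : h = "U" <;> by_cases hD : h = "D" <;> by_cases hR : h = "R" <;>
      by_cases hL : h = "L" <;>
      simp_all [List.foldl_cons] <;> omega

-- ===== VERDICT =====
theorem get_drone_position_spec : Claim_equal_get_drone_position := by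
  intro moves _
  show get_drone_position moves = get_drone_position_alt moves
  simp only [get_drone_position, get_drone_position_alt, fold_counts, PySem.List.count_eq]
  simp
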